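-- pv_equiv track=rewrite | github.com/Mariann91/Python-SoftUni | Python-Basics/Drawing Figures with Loops - More Exercises/square_frame.py | return_line
-- ===== SOURCE A (Python) =====
-- def return_line(char, length):
--     line = []
--
--     for i in range(length):
--
--         if i == 0:
--
--             line.append(f"{char}")
--         elif i == length - 1:
--             line.append(f"{char}")
--         else:
--             line.append(f"-")
--
--     return line
-- ===== SOURCE B (Python) =====
-- def return_line(char, length):
--     if length <= 0:
--         return []
--     if length == 1:
--         return [char]
--     return [char] + ["-"] * (length - 2) + [char]
-- ===== Notes on version B (the rewrite author's own statement) =====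
-- stated objective: simpler
-- what changed: Eliminates the per-index loop entirely: B handles the degenerate sizes (<=0 and 1) explicitly and otherwise returns the closed-form concatenation [char] + ['-']*(length-2) + [char].
import Mathlib
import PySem

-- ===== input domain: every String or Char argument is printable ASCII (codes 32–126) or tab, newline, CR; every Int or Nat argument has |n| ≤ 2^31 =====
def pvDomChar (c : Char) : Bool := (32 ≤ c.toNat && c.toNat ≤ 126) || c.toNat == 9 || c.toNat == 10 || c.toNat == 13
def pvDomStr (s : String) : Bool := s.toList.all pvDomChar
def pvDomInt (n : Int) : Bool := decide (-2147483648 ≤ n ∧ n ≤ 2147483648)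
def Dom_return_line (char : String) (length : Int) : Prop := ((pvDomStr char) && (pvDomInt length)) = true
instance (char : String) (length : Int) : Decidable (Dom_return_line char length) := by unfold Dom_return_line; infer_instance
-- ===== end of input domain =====

-- B removes A's per-index loop: explicit cases for length ≤ 0 and length = 1, else the closed-form concatenation [char] ++ dashes ++ [char] (simpler).

-- ===== PORT A =====
def return_line (char : String) (length : Int) : List String :=
  (PySem.List.pyRange 0 length 1).foldl (fun line i =>
    if i = 0 then line ++ [char]
    else if i = length - 1 then line ++ [char]
    else line ++ ["-"]) []

-- ===== PORT B =====
def return_line_alt (char : String) (length : Int) : List String :=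
  if length ≤ 0 then []
  else if length = 1 then [char]
  else [char] ++ List.replicate (length - 2).toNat "-" ++ [char]

-- ===== PRECONDITION & SPEC =====
def Spec_return_line (char : String) (length : Int) (out : List String) : Prop := out = return_line_alt char length
instance (char : String) (length : Int) (out : List String) : Decidable (Spec_return_line char length out) := by unfold Spec_return_line; infer_instance

-- ===== CLAIM =====
def Claim_equal_return_line : Prop := ∀ (char : String) (length : Int), Dom_return_line char length → Spec_return_line char length (return_line char length)

-- ===== LEMMAS AND PROOFS =====

-- A's loop is a map over the range
theorem return_line_eq_map (char : String) (length : Int) :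
    return_line char length =
      (PySem.List.pyRange 0 length 1).map
        (fun i => if i = 0 then char else if i = length - 1 then char else "-") := by
  unfold return_line
  have h : (fun (line : List String) (i : Int) =>
      if i = 0 then line ++ [char]
      else if i = length - 1 then line ++ [char]
      else line ++ ["-"])
      = fun line i => line ++ [if i = 0 then char else if i = length - 1 then char else "-"] := by
    funext line i; split_ifs <;> rfl
  rw [h, PySem.List.foldl_append_singleton_eq_map]
  simp

theorem return_line_spec_aux (char : String) (n : Nat) (hn : 2 ≤ n) :
    return_line char (n : Int) = [char] ++ List.replicate ((n : Int) - 2).toNat "-" ++ [char] := by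
  rw [return_line_eq_map, PySem.List.pyRange_zero_natCast]
  have h2 : ((n : Int) - 2).toNat = n - 2 := by omega
  rw [h2]
  apply List.ext_getElem
  · simp; omega
  · intro i h1 h2'
    have hi : i < n := by simpa using h1
    simp only [List.getElem_map, List.getElem_range]
    by_cases hi0 : i = 0
    · subst hi0
      simp
    · have h1' : ¬ ((i : Int) = 0) := by exact_mod_cast hi0
      rw [if_neg h1']
      have hipos : 1 ≤ i := by omega
      by_cases hlast : i = n - 1
      · have : ((i : Int) = (n : Int) - 1) := by omega
        rw [if_pos this]
        have hlen : i = (([char] ++ List.replicate (n-2) "-").length) := by simp; omega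
        rw [List.getElem_append_right (by simp; omega)]
        simp
      · have h2'' : ¬ ((i : Int) = (n : Int) - 1) := by omega
        rw [if_neg h2'']
        rw [List.getElem_append_left (by simp; omega)]
        rw [List.getElem_append_right (by simp; omega)]
        simp

-- ===== VERDICT =====
theorem return_line_spec : Claim_equal_return_line := by
  intro char length _
  unfold Spec_return_line return_line_alt
  split_ifs with hle h1
  · unfold return_line
    have : PySem.List.pyRange 0 length 1 = [] := by
      simp [PySem.List.pyRange]; omega
    simp [this]
  · subst h1
    have : PySem.List.pyRange 0 1 1 = [0] := by decide
    simp [return_line, this]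
  · rcases Int.eq_ofNat_of_zero_le (a := length) (by omega) with ⟨n, hn⟩
    subst hn
    exact return_line_spec_aux char n (by exact_mod_cast (by omega : (2:Int) ≤ (n:Int)))
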